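-- pv_equiv track=rewrite | github.com/swidoff/aoc-2024 | src/day19.py | part1
-- ===== SOURCE A (Python) =====
-- from functools import cache
--
-- def part1(towels: list[str], patterns: list[str]) -> int:
--     @cache
--     def is_possible(pattern: str) -> bool:
--         if not pattern:
--             return True
--
--         for t in towels:
--             if pattern.startswith(t) and is_possible(pattern[len(t) :]):
--                 return True
--
--         return False
--
--     return sum(is_possible(p) for p in patterns)
-- ===== SOURCE B (Python) =====
-- def part1(towels: list[str], patterns: list[str]) -> int:
--     def ok(p: str) -> bool:
--         n = len(p)
--         dp = [False] * (n + 1)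
--         dp[n] = True
--         for i in range(n - 1, -1, -1):
--             dp[i] = any(p.startswith(t, i) and dp[i + len(t)] for t in towels)
--         return dp[0]
--
--     return sum(ok(p) for p in patterns)
-- ===== Notes on version B (the rewrite author's own statement) =====
-- stated objective: alternative
-- what changed: Replaced the memoized top-down recursion over pattern suffixes with an iterative bottom-up boolean DP table per pattern (dp[i] = suffix starting at i is constructible), looping over positions instead of recursing.
-- crash fix: When towels contains the empty string and some pattern's greedy first-matching-towel decomposition gets stuck on it, A raises RecursionError (it recurses on the unchanged suffix); B's DP never uses the empty towel and returns the count of patterns constructible from the non-empty towels. — e.g. on part1([""], ["a"]): A raises RecursionError, B returns 0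
import Mathlib
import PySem

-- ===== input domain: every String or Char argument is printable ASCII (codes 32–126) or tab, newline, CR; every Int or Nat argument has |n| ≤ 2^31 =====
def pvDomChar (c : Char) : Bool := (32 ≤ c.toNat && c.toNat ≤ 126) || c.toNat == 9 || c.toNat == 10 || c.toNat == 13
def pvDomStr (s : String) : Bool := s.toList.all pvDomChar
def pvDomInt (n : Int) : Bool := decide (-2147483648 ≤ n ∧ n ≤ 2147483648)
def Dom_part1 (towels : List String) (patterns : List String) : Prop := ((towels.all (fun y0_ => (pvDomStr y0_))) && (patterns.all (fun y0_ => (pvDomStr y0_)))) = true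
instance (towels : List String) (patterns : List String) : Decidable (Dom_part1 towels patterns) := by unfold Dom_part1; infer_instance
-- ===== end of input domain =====

-- B replaces A's memoized top-down recursion with an iterative bottom-up DP table per pattern (alternative decomposition, same cost).


-- ===== PORT A =====
-- A's is_possible: recursion over the pattern suffix.  The fuel pattern.length+1 only
-- makes the recursion total in Lean (an empty towel recurses on the unchanged suffix;
-- fuel exhaustion yields False, matching that no decomposition is found along that
-- branch).  The @cache is pure memoization and does not change the returned value.
def isPossibleA (ts : List (List Char)) : Nat → List Char → Bool
  | 0, _ => false
  | fuel + 1, p =>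
    if p = [] then true
    else ts.any (fun t => t.isPrefixOf p && isPossibleA ts fuel (p.drop t.length))

def part1 (towels : List String) (patterns : List String) : Int :=
  (patterns.map (fun p =>
    if isPossibleA (towels.map String.toList) (p.toList.length + 1) p.toList then (1 : Int) else 0)).sum

-- ===== PORT B =====
-- B's dp table for a suffix: dpListB ts s = [dp[i], dp[i+1], …, dp[n]] where s is the
-- suffix of the pattern starting at position i; built back-to-front exactly as Source B
-- fills dp from i = n-1 down to 0.  An empty towel t reads dp[i] while it still holds
-- its default False (as in Source B), hence the `if t = [] then false` arm.
def dpListB (ts : List (List Char)) : List Char → List Bool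
  | [] => [true]
  | c :: rest =>
    let dp := dpListB ts rest
    (ts.any (fun t => t.isPrefixOf (c :: rest) &&
        (if t = [] then false else dp.getD (t.length - 1) false))) :: dp

def part1_alt (towels : List String) (patterns : List String) : Int :=
  (patterns.map (fun p =>
    if (dpListB (towels.map String.toList) p.toList).headD false then (1 : Int) else 0)).sum

-- ===== PRECONDITION & SPEC =====
-- pvGreedyOk: the first towel (in list order) that is a prefix of the suffix decides A's fate
-- when an empty towel is present (A's search can then never return False on a non-empty
-- suffix): A returns normally iff that greedy first-match decomposition of every pattern
-- reaches the end without the first match being the empty towel.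
def pvFirstPiece (ws : List (List Char)) (s : List Char) : Option (List Char) :=
  ws.find? (fun w => w.isPrefixOf s)

-- each greedy step consumes at least one character, so p.length steps always suffice
def pvGreedyOkAux (ws : List (List Char)) : Nat → List Char → Bool
  | _, [] => true
  | 0, _ :: _ => false
  | n + 1, a :: s =>
    match pvFirstPiece ws (a :: s) with
    | some (_ :: w) => pvGreedyOkAux ws n (s.drop w.length)
    | _ => false

def pvGreedyOk (ws : List (List Char)) (p : List Char) : Bool := pvGreedyOkAux ws p.length p

-- Pre_ excludes exactly the inputs on which A raises RecursionError: with an empty towel in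
-- the list, A recurses forever as soon as some pattern's greedy first-matching-towel
-- decomposition gets stuck on the empty towel; on the other inputs A returns (up to the
-- interpreter's recursion-depth limit on extremely long patterns).
def Pre_part1 (towels : List String) (patterns : List String) : Prop :=
  "" ∉ towels ∨ ∀ p ∈ patterns, pvGreedyOk (towels.map String.toList) p.toList = true
instance (towels : List String) (patterns : List String) : Decidable (Pre_part1 towels patterns) := by unfold Pre_part1; infer_instance
def pvWitness_part1 : List String × List String := (["r", "wr", "b"], ["brwr", "bggr"])

-- When towels contains the empty string and some pattern's greedy first-match decomposition
-- gets stuck on it, A raises RecursionError; B's DP never uses the empty towel and returns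
-- the count of patterns constructible from the non-empty towels.
def Raises_part1 (towels : List String) (patterns : List String) : Prop :=
  "" ∈ towels ∧ ∃ p ∈ patterns, pvGreedyOk (towels.map String.toList) p.toList = false
instance (towels : List String) (patterns : List String) : Decidable (Raises_part1 towels patterns) := by unfold Raises_part1; infer_instance
def pvRaiseWitness_part1 : List String × List String := ([""], ["a"])
def pvRaiseWitnessOut_part1 : Int := 0

def Spec_part1 (towels : List String) (patterns : List String) (out : Int) : Prop := out = part1_alt towels patterns
instance (towels : List String) (patterns : List String) (out : Int) : Decidable (Spec_part1 towels patterns out) := by unfold Spec_part1; infer_instance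

-- ===== CLAIM (what is proved, stated in full; the proofs are below) =====
def Claim_equal_part1 : Prop := ∀ (towels : List String) (patterns : List String), Dom_part1 towels patterns → Pre_part1 towels patterns → Spec_part1 towels patterns (part1 towels patterns)
def Claim_raises_part1 : Prop := (∀ (towels : List String) (patterns : List String), Dom_part1 towels patterns → Raises_part1 towels patterns → ¬ Pre_part1 towels patterns) ∧ (Dom_part1 (pvRaiseWitness_part1.1) (pvRaiseWitness_part1.2) ∧ Raises_part1 (pvRaiseWitness_part1.1) (pvRaiseWitness_part1.2) ∧ part1_alt (pvRaiseWitness_part1.1) (pvRaiseWitness_part1.2) = pvRaiseWitnessOut_part1)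

-- ===== LEMMAS AND PROOFS =====

theorem dpListB_getD (ts : List (List Char)) (p : List Char) (k : Nat) (hk : k ≤ p.length) :
    (dpListB ts p).getD k false = (dpListB ts (p.drop k)).headD false := by
  induction p generalizing k with
  | nil =>
    have hk0 : k = 0 := Nat.le_zero.mp hk
    subst hk0
    simp [dpListB]
  | cons c rest ih =>
    cases k with
    | zero => simp [dpListB]
    | succ k =>
      have hk' : k ≤ rest.length := by simpa using hk
      simpa [dpListB] using ih k hk'

theorem drop_cons_of_pos (c : Char) (rest t : List Char) (h : t ≠ []) :
    (c :: rest).drop t.length = rest.drop (t.length - 1) := by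
  obtain ⟨n, hn⟩ : ∃ n, t.length = n + 1 :=
    ⟨t.length - 1, by have := List.length_pos_iff.mpr h; omega⟩
  simp [hn]

-- A's recursion can only succeed along a branch using non-empty towels, and every such
-- decomposition is recorded by B's dp table.
theorem isPossibleA_imp_dp (ts : List (List Char)) (fuel : Nat) (p : List Char)
    (h : isPossibleA ts fuel p = true) : (dpListB ts p).headD false = true := by
  induction fuel generalizing p with
  | zero => simp [isPossibleA] at h
  | succ fuel ih =>
    by_cases hp : p = []
    · subst hp; simp [dpListB]
    · obtain ⟨c, rest, rfl⟩ := List.exists_cons_of_ne_nil hp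
      rw [isPossibleA, if_neg hp] at h
      obtain ⟨t, ht, hconj⟩ := List.any_eq_true.mp h
      obtain ⟨hpre, hrec⟩ := (Bool.and_eq_true _ _).mp hconj
      by_cases htnil : t = []
      · subst htnil
        simpa using ih _ (by simpa using hrec)
      · have hrec' := ih _ hrec
        rw [drop_cons_of_pos c rest t htnil] at hrec'
        have hlep : t.length ≤ rest.length + 1 := by
          simpa using (List.isPrefixOf_iff_prefix.mp hpre).length_le
        simp only [dpListB, List.headD_cons]
        refine List.any_eq_true.mpr ⟨t, ht, ?_⟩
        rw [hpre, if_neg htnil, dpListB_getD ts rest (t.length - 1) (by omega), hrec']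
        rfl

-- Conversely, with fuel > |p| the fuelled recursion finds any decomposition B's dp records.
theorem dp_imp_isPossibleA (ts : List (List Char)) (fuel : Nat) (p : List Char)
    (hf : p.length < fuel) (h : (dpListB ts p).headD false = true) :
    isPossibleA ts fuel p = true := by
  induction fuel generalizing p with
  | zero => omega
  | succ fuel ih =>
    by_cases hp : p = []
    · subst hp; simp [isPossibleA]
    · obtain ⟨c, rest, rfl⟩ := List.exists_cons_of_ne_nil hp
      simp only [dpListB, List.headD_cons] at h
      obtain ⟨t, ht, hconj⟩ := List.any_eq_true.mp h
      obtain ⟨hpre, hval⟩ := (Bool.and_eq_true _ _).mp hconj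
      by_cases htnil : t = []
      · rw [if_pos htnil] at hval; exact absurd hval (by simp)
      · rw [if_neg htnil] at hval
        have hlep : t.length ≤ rest.length + 1 := by
          simpa using (List.isPrefixOf_iff_prefix.mp hpre).length_le
        rw [dpListB_getD ts rest (t.length - 1) (by omega)] at hval
        rw [← drop_cons_of_pos c rest t htnil] at hval
        have hlen1 : 1 ≤ t.length := List.length_pos_iff.mpr htnil
        have hrec : isPossibleA ts fuel ((c :: rest).drop t.length) = true := by
          apply ih _ _ hval
          have := List.length_drop (l := c :: rest) (i := t.length)
          simp at hf this ⊢
          omega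
        rw [isPossibleA, if_neg hp]
        exact List.any_eq_true.mpr ⟨t, ht, by rw [hpre, hrec]; rfl⟩

theorem isPossibleA_eq_dp (ts : List (List Char)) (p : List Char) :
    isPossibleA ts (p.length + 1) p = (dpListB ts p).headD false := by
  cases h1 : isPossibleA ts (p.length + 1) p with
  | true => exact (isPossibleA_imp_dp ts _ p h1).symm
  | false =>
    cases h2 : (dpListB ts p).headD false with
    | true =>
      have hc := dp_imp_isPossibleA ts _ p (Nat.lt_succ_self _) h2
      rw [hc] at h1
      exact absurd h1 (by decide)
    | false => rfl

-- ===== VERDICT (by name: the statement is the Claim_ definition above) =====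
theorem part1_spec : Claim_equal_part1 := by
  intro towels patterns _ _
  unfold Spec_part1 part1 part1_alt
  congr 1
  apply List.map_congr_left
  intro p _
  rw [isPossibleA_eq_dp]

@[simp] theorem part1_raises : Claim_raises_part1 := by
  unfold Claim_raises_part1
  refine ⟨?_, by decide, by decide, by decide⟩
  rintro towels patterns _ ⟨h1, p, hp, hg⟩ hpre
  rcases hpre with h | h
  · exact h h1
  · rw [h p hp] at hg; exact absurd hg (by decide)
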